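-- pv_equiv track=rewrite | github.com/chennyso/agent | src/megatron_agent/torchtitan_hybrid.py | _counts_to_ranges
-- ===== SOURCE A (Python) =====
-- from typing import Any, Dict, Iterable, List, Optional, Sequence, Tuple
--
-- def _counts_to_ranges(counts: Sequence[int]) -> List[List[int]]:
--     start = 0
--     ranges: List[List[int]] = []
--     for count in counts:
--         width = max(int(count), 1)
--         end = start + width - 1
--         ranges.append([start, end])
--         start = end + 1
--     return ranges
-- ===== SOURCE B (Python) =====
-- from typing import List, Sequence
--
-- def _counts_to_ranges(counts: Sequence[int]) -> List[List[int]]: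
--     seg = list(counts)
--
--     def go(seg: List[int]) -> List[List[int]]:
--         if len(seg) <= 1:
--             return [[0, max(int(seg[0]), 1) - 1]] if seg else []
--         mid = len(seg) // 2
--         left = go(seg[:mid])
--         right = go(seg[mid:])
--         off = left[-1][1] + 1
--         return left + [[a + off, b + off] for a, b in right]
--
--     return go(seg)
-- ===== Notes on version B (the rewrite author's own statement) =====
-- stated objective: alternative
-- what changed: Replaces the single left-to-right loop threading a running start with a divide-and-conquer recursion: each half is solved independently starting from 0 and the right half's ranges are shifted by the left half's total width (correct because ranges are translation-equivariant).
import Mathlib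
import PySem

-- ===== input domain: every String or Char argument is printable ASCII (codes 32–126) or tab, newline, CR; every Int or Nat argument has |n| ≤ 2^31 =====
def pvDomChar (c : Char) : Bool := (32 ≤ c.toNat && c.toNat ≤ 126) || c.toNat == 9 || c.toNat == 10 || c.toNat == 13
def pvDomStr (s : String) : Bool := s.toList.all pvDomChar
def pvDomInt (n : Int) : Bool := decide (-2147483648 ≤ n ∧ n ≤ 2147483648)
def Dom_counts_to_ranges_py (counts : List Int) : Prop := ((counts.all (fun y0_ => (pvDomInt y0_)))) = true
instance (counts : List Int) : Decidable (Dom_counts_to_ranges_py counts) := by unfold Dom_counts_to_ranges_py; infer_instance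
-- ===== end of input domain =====

-- B replaces the running-start loop with a divide-and-conquer recursion (solve halves at 0, shift the right half); alternative decomposition, return value only.


-- ===== PORT A =====
def counts_to_ranges_py (counts : List Int) : List (List Int) :=
  (counts.foldl
    (fun (st : Int × List (List Int)) count =>
      let width := max count 1
      let e := st.1 + width - 1
      (e + 1, st.2 ++ [[st.1, e]]))
    (0, [])).2

-- ===== PORT B =====
-- divide and conquer: solve each half starting from 0, shift the right half by
-- the left half's last end + 1 (left[-1][1] + 1 ported via getLastD/getD; left is
-- never empty in the recursive branch, so the defaults are never read)
def pvGo (seg : List Int) : List (List Int) :=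
  if _h : seg.length ≤ 1 then
    match seg with
    | [] => []
    | c :: _ => [[0, max c 1 - 1]]
  else
    let mid := seg.length / 2
    let left := pvGo (seg.take mid)
    let right := pvGo (seg.drop mid)
    let off := ((left.getLastD []).getD 1 0) + 1
    left ++ right.map (fun r => [r.getD 0 0 + off, r.getD 1 0 + off])
termination_by seg.length
decreasing_by
  · simp [List.length_take]; omega
  · simp [List.length_drop]; omega

def counts_to_ranges_py_alt (counts : List Int) : List (List Int) :=
  pvGo counts

-- ===== PRECONDITION & SPEC =====
def Spec_counts_to_ranges_py (counts : List Int) (out : List (List Int)) : Prop := out = counts_to_ranges_py_alt counts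
instance (counts : List Int) (out : List (List Int)) : Decidable (Spec_counts_to_ranges_py counts out) := by unfold Spec_counts_to_ranges_py; infer_instance

-- ===== CLAIM (what is proved, stated in full; the proofs are below) =====
def Claim_equal_counts_to_ranges_py : Prop := ∀ (counts : List Int), Dom_counts_to_ranges_py counts → Spec_counts_to_ranges_py counts (counts_to_ranges_py counts)

-- ===== LEMMAS AND PROOFS =====

-- canonical form both ports are reduced to
def pvRanges (s : Int) : List Int → List (List Int)
  | [] => []
  | c :: cs => [s, s + max c 1 - 1] :: pvRanges (s + max c 1) cs

def pvSumW (xs : List Int) : Int := (xs.map (fun c => max c 1)).sum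

lemma pvSumW_cons (c : Int) (cs : List Int) : pvSumW (c :: cs) = max c 1 + pvSumW cs := by
  simp [pvSumW]

lemma ranges_append (xs ys : List Int) (s : Int) :
    pvRanges s (xs ++ ys) = pvRanges s xs ++ pvRanges (s + pvSumW xs) ys := by
  induction xs generalizing s with
  | nil => simp [pvRanges, pvSumW]
  | cons c cs ih =>
      simp only [List.cons_append, pvRanges, pvSumW_cons, ih]
      ring_nf

lemma ranges_shift (cs : List Int) (a b : Int) :
    pvRanges (a + b) cs = (pvRanges a cs).map (fun r => [r.getD 0 0 + b, r.getD 1 0 + b]) := by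
  induction cs generalizing a with
  | nil => simp [pvRanges]
  | cons c cs ih =>
      simp only [pvRanges, List.map_cons]
      congr 1
      · simp [List.getD]
        omega
      · have h2 : a + b + max c 1 = (a + max c 1) + b := by ring
        rw [h2, ih]

lemma ranges_last (xs : List Int) (s : Int) (h : xs ≠ []) (d : List Int) :
    ((pvRanges s xs).getLastD d).getD 1 0 = s + pvSumW xs - 1 := by
  induction xs generalizing s d with
  | nil => exact absurd rfl h
  | cons c cs ih =>
      cases cs with
      | nil => simp [pvRanges, pvSumW, List.getD]
      | cons e es =>
          simp only [pvRanges, pvSumW_cons]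
          rw [List.getLastD_cons]
          have := ih (s := s + max c 1) (d := [s, s + max c 1 - 1]) (h := by simp)
          simp only [pvRanges, pvSumW_cons] at this
          rw [this]
          ring

lemma pvGo_eq_ranges (seg : List Int) : pvGo seg = pvRanges 0 seg := by
  induction seg using pvGo.induct with
  | case1 _ _ => rw [pvGo]; simp [pvRanges]
  | case2 c cs h _ =>
      have hcs : cs = [] := by simpa using h
      subst hcs
      rw [pvGo]; simp [pvRanges]
  | case3 seg h mid0 ih1 ih2 =>
      rw [pvGo]
      simp only [dif_neg h]
      set mid := seg.length / 2 with hmid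
      rw [ih1, ih2]
      have htake : seg.take mid ≠ [] := by
        have hm : 0 < mid := by omega
        intro hc
        have h2 : (seg.take mid).length = 0 := by rw [hc]; rfl
        rw [List.length_take] at h2
        omega
      rw [ranges_last _ 0 htake]
      have hshift := ranges_shift (seg.drop mid) 0 (pvSumW (seg.take mid))
      have hz : (0 : Int) + pvSumW (seg.take mid) = pvSumW (seg.take mid) := by ring
      rw [hz] at hshift
      have hoff : (0 : Int) + pvSumW (seg.take mid) - 1 + 1 = pvSumW (seg.take mid) := by ring
      rw [hoff, ← hshift]
      have happ := ranges_append (seg.take mid) (seg.drop mid) 0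
      rw [List.take_append_drop] at happ
      rw [happ, hz]

lemma ctr_loop (counts : List Int) (s : Int) (acc : List (List Int)) :
    (counts.foldl
      (fun (st : Int × List (List Int)) count =>
        let width := max count 1
        let e := st.1 + width - 1
        (e + 1, st.2 ++ [[st.1, e]]))
      (s, acc)).2
    = acc ++ pvRanges s counts := by
  induction counts generalizing s acc with
  | nil => simp [pvRanges]
  | cons c cs ih =>
      simp only [List.foldl_cons, pvRanges]
      rw [ih]
      have h1 : s + max c 1 - 1 + 1 = s + max c 1 := by omega
      rw [h1]; simp

-- ===== VERDICT (by name: the statement is the Claim_ definition above) =====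
theorem counts_to_ranges_py_spec : Claim_equal_counts_to_ranges_py := by
  intro counts _
  unfold Spec_counts_to_ranges_py counts_to_ranges_py counts_to_ranges_py_alt
  rw [pvGo_eq_ranges]
  simpa using ctr_loop counts 0 []
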